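-- pv_equiv track=rewrite | github.com/NoahMekonnen/23.2-Python-Data-Structures-Exercises | 27_titleize/titleize.py | titleize
-- ===== SOURCE A (Python) =====
-- def titleize(phrase):
--     """Return phrase in title case (each word capitalized).
--
--         >>> titleize('this is awesome')
--         'This Is Awesome'
--
--         >>> titleize('oNLy cAPITALIZe fIRSt')
--         'Only Capitalize First'
--     """
--     temp_list = phrase.split(" ")
--     final_temp_list = []
--     for i in range(len(temp_list)):
--         temp_list[i] = temp_list[i].lower()
--     for i in range(len(temp_list)):
--         final_temp_list.append([char for char in temp_list[i]])
--     for i in range(len(final_temp_list)):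
--         final_temp_list[i][0] = final_temp_list[i][0].upper()
--         if i < len(final_temp_list)-1:
--             final_temp_list[i].append(' ')
--         final_temp_list[i] = ''.join(final_temp_list[i])
--     return ''.join(final_temp_list)
-- ===== SOURCE B (Python) =====
-- def titleize(phrase):
--     return " ".join(w[0].upper() + w[1:].lower() for w in phrase.split(" "))
-- ===== Notes on version B (the rewrite author's own statement) =====
-- stated objective: simpler
-- what changed: Replaces A's three separate index loops over a mutable list of char-lists (lowercase pass, char-list-copy pass, capitalize-and-append-space pass) with a single join over a per-word slicing expression w[0].upper() + w[1:].lower().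
import Mathlib
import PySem

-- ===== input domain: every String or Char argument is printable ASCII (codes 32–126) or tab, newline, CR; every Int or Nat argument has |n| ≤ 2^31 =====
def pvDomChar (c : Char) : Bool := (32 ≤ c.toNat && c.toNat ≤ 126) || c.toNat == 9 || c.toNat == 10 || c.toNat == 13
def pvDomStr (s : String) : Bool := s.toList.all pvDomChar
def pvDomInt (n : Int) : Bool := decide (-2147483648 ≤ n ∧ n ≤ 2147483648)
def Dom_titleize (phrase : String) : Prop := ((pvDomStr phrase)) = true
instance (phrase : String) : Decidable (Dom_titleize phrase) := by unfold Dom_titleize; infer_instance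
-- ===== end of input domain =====

-- B replaces A's three index loops over a mutable list of char-lists with a single join over a
-- per-word slicing expression; equal on Pre_ (phrases with no empty word; elsewhere both raise).


-- ===== PORT A =====
-- body of A's third loop: final_temp_list[i][0] = final_temp_list[i][0].upper();
-- if i < len(final_temp_list)-1: append ' '; the trailing ''.join of a list of chars is that list.
-- (final_temp_list[i][0] raises IndexError on an empty word: totalised with a default, exact under Pre_)
def pvAword (n : Nat) (i : Int) (w : List Char) : List Char :=
  let w' := PySem.List.pySetD w 0 (PySem.Chars.upperChar (PySem.List.pyGetD w 0 ' '))
  if i < (n : Int) - 1 then w' ++ [' '] else w'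

def titleize (phrase : String) : String :=
  -- temp_list = phrase.split(" ")
  let tempList := PySem.Chars.splitOn phrase.toList [' ']
  -- for i in range(len(temp_list)): temp_list[i] = temp_list[i].lower()
  let tempList2 := (PySem.List.pyRange 0 (tempList.length : Int) 1).foldl
    (fun l i => PySem.List.pySetD l i (PySem.Chars.lower (PySem.List.pyGetD l i []))) tempList
  -- for i in range(len(temp_list)): final_temp_list.append([char for char in temp_list[i]])
  -- (a char-by-char copy of a list of chars is that list)
  let finalTempList := (PySem.List.pyRange 0 (tempList2.length : Int) 1).foldl
    (fun acc i => acc ++ [PySem.List.pyGetD tempList2 i []]) []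
  -- for i in range(len(final_temp_list)): <pvAword above, in place at index i>
  let finalTempList2 := (PySem.List.pyRange 0 (finalTempList.length : Int) 1).foldl
    (fun l i => PySem.List.pySetD l i (pvAword l.length i (PySem.List.pyGetD l i []))) finalTempList
  -- return ''.join(final_temp_list)
  String.ofList (PySem.Chars.join [] finalTempList2)

-- ===== PORT B =====
-- w[0].upper() + w[1:].lower()   (w[0] raises IndexError on an empty word: totalised, exact under Pre_)
def pvBword (w : List Char) : List Char :=
  PySem.Chars.upper [PySem.List.pyGetD w 0 ' '] ++
    PySem.Chars.lower (PySem.List.slice w (some 1) none)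

def titleize_alt (phrase : String) : String :=
  String.ofList (PySem.Chars.join [' ']
    ((PySem.Chars.splitOn phrase.toList [' ']).map pvBword))

-- ===== PRECONDITION & SPEC =====
-- Pre_ excludes exactly the phrases whose split contains an empty word (empty string,
-- leading/trailing/double spaces): there both A and B raise IndexError on the word's [0].
def Pre_titleize (phrase : String) : Prop :=
  ∀ w ∈ PySem.Chars.splitOn phrase.toList [' '], w ≠ []
instance (phrase : String) : Decidable (Pre_titleize phrase) := by unfold Pre_titleize; infer_instance
def pvWitness_titleize : String := "oNLy cAPITALIZe fIRSt"

def Spec_titleize (phrase : String) (out : String) : Prop := out = titleize_alt phrase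
instance (phrase : String) (out : String) : Decidable (Spec_titleize phrase out) := by unfold Spec_titleize; infer_instance

-- ===== CLAIM (what is proved, stated in full; the proofs are below) =====
def Claim_equal_titleize : Prop := ∀ (phrase : String), Dom_titleize phrase → Pre_titleize phrase → Spec_titleize phrase (titleize phrase)

-- ===== LEMMAS AND PROOFS =====

-- the result of an in-place 'for i in range(len(l)): l[i] = g(len(l), i, l[i])' loop
def pvApplyIdx {α : Type} (g : Nat → Int → α → α) (n : Nat) : Nat → List α → List α
  | _, [] => []
  | i, y :: ys => g n (i : Int) y :: pvApplyIdx g n (i + 1) ys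

lemma pvApplyIdx_cons {α : Type} (g : Nat → Int → α → α) (n i : Nat) (y : α) (ys : List α) :
    pvApplyIdx g n i (y :: ys) = g n (i : Int) y :: pvApplyIdx g n (i + 1) ys := rfl

lemma pvSetLoop {α : Type} (g : Nat → Int → α → α) (d : α) :
    ∀ (ys pre : List α),
    (PySem.List.pyRange (pre.length : Int) ((pre.length + ys.length : Nat) : Int) 1).foldl
      (fun l i => PySem.List.pySetD l i (g l.length i (PySem.List.pyGetD l i d))) (pre ++ ys)
    = pre ++ pvApplyIdx g (pre.length + ys.length) pre.length ys := by
  intro ys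
  induction ys with
  | nil =>
      intro pre
      rw [PySem.List.pyRange_one_eq_nil (by simp)]
      simp [pvApplyIdx]
  | cons y ys ih =>
      intro pre
      rw [PySem.List.pyRange_one_cons
        (by exact_mod_cast Nat.lt_add_of_pos_right (Nat.succ_pos ys.length))]
      simp only [List.foldl_cons]
      have hget : PySem.List.pyGetD (pre ++ y :: ys) (pre.length : Int) d = y := by simp
      have hlen : (pre ++ y :: ys).length = pre.length + (ys.length + 1) := by simp
      rw [hget, hlen]
      have hset : PySem.List.pySetD (pre ++ y :: ys) (pre.length : Int)
          (g (pre.length + (ys.length + 1)) (pre.length : Int) y)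
          = pre ++ g (pre.length + (ys.length + 1)) (pre.length : Int) y :: ys := by simp
      rw [hset]
      have ih' := ih (pre ++ [g (pre.length + (ys.length + 1)) (pre.length : Int) y])
      simp only [List.length_append, List.length_cons, List.length_nil] at ih' ⊢
      rw [show pre ++ g (pre.length + (ys.length + 1)) (pre.length : Int) y :: ys
            = (pre ++ [g (pre.length + (ys.length + 1)) (pre.length : Int) y]) ++ ys by simp]
      rw [show ((pre.length : Int) + 1) = ((pre.length + (0 + 1) : Nat) : Int) by push_cast; ring]
      rw [show ((pre.length + (ys.length + 1) : Nat) : Int)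
            = ((pre.length + (0 + 1) + ys.length : Nat) : Int) by push_cast; ring]
      rw [ih']
      rw [show pre.length + (0 + 1) + ys.length = pre.length + (ys.length + 1) from by omega]
      rw [show pre.length + (0 + 1) = pre.length + 1 from by omega]
      simp [pvApplyIdx]

lemma pvApplyIdx_const {α : Type} (f : α → α) (n : Nat) :
    ∀ (ys : List α) (i : Nat), pvApplyIdx (fun _ _ a => f a) n i ys = ys.map f := by
  intro ys
  induction ys with
  | nil => intro i; rfl
  | cons y ys ih => intro i; simp [pvApplyIdx, ih]

lemma pvCharLe (d e : Char) : (d ≤ e) ↔ d.toNat ≤ e.toNat := by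
  rw [Char.le_def, UInt32.le_iff_toNat_le]; simp [Char.toNat_val]

lemma pvCharUL (c : Char) :
    PySem.Chars.upperChar (PySem.Chars.lowerChar c) = PySem.Chars.upperChar c := by
  have hA : ('A':Char).toNat = 65 := rfl
  have hZ : ('Z':Char).toNat = 90 := rfl
  have ha : ('a':Char).toNat = 97 := rfl
  have hz : ('z':Char).toNat = 122 := rfl
  unfold PySem.Chars.lowerChar PySem.Chars.upperChar PySem.Chars.isupper PySem.Chars.islower
  by_cases h : 'A' ≤ c ∧ c ≤ 'Z'
  · have h1 : 65 ≤ c.toNat := by rw [← hA, ← pvCharLe]; exact h.1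
    have h2 : c.toNat ≤ 90 := by rw [← hZ, ← pvCharLe]; exact h.2
    have hv : (c.toNat + 32).isValidChar := Or.inl (by omega)
    have ht : (Char.ofNat (c.toNat + 32)).toNat = c.toNat + 32 := by
      rw [Char.toNat_ofNat, if_pos hv]
    have e1 : (decide ('A' ≤ c) && decide (c ≤ 'Z')) = true := by
      simp only [Bool.and_eq_true, decide_eq_true_eq]; exact h
    have e2 : (decide ('a' ≤ Char.ofNat (c.toNat + 32)) && decide (Char.ofNat (c.toNat + 32) ≤ 'z')) = true := by
      simp only [Bool.and_eq_true, decide_eq_true_eq, pvCharLe, ha, hz]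
      rw [ht]
      omega
    have e3 : (decide ('a' ≤ c) && decide (c ≤ 'z')) ≠ true := by
      intro hx
      rw [Bool.and_eq_true, decide_eq_true_eq, decide_eq_true_eq, pvCharLe, pvCharLe, ha, hz] at hx
      omega
    rw [if_pos e1, if_pos e2, if_neg e3, ht, Nat.add_sub_cancel, Char.ofNat_toNat]
  · have e1 : (decide ('A' ≤ c) && decide (c ≤ 'Z')) ≠ true := by
      intro hx
      rw [Bool.and_eq_true, decide_eq_true_eq, decide_eq_true_eq] at hx
      exact h hx
    rw [if_neg e1]

-- capitalising the head of the lowered word = B's per-word expression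
lemma pvWordEq (w : List Char) (hw : w ≠ []) :
    PySem.List.pySetD (PySem.Chars.lower w) 0
      (PySem.Chars.upperChar (PySem.List.pyGetD (PySem.Chars.lower w) 0 ' '))
    = pvBword w := by
  cases w with
  | nil => exact absurd rfl hw
  | cons c t =>
    simp [pvBword, PySem.Chars.lower, PySem.Chars.upper, PySem.List.slice_from_one, pysem, pvCharUL]

-- ''.join of the capitalised words with a space appended to all but the last
-- = ' '.join of B's words
lemma pvJoinLoop :
    ∀ (ws : List (List Char)) (w : List Char) (i n : Nat), i + (w :: ws).length = n →
      (∀ v ∈ w :: ws, v ≠ []) →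
    PySem.Chars.join [] (pvApplyIdx pvAword n i ((w :: ws).map PySem.Chars.lower))
      = PySem.Chars.join [' '] ((w :: ws).map pvBword) := by
  intro ws
  induction ws with
  | nil =>
      intro w i n hn hne
      have hc : ¬ ((i : Int) < (n : Int) - 1) := by
        simp at hn; omega
      simp only [List.map_cons, List.map_nil, pvApplyIdx, pvAword, if_neg hc]
      rw [pvWordEq w (hne w (by simp))]
      rw [PySem.Chars.join_singleton, PySem.Chars.join_singleton]
  | cons w' ws ih =>
      intro w i n hn hne
      have hc : (i : Int) < (n : Int) - 1 := by
        simp at hn; omega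
      rw [List.map_cons, pvApplyIdx_cons]
      have hA : pvAword n (i : Int) (PySem.Chars.lower w) = pvBword w ++ [' '] := by
        simp only [pvAword, if_pos hc]
        rw [pvWordEq w (hne w (by simp))]
      rw [hA]
      rw [show List.map PySem.Chars.lower (w' :: ws)
            = PySem.Chars.lower w' :: ws.map PySem.Chars.lower from rfl, pvApplyIdx_cons]
      rw [PySem.Chars.join_cons_cons]
      rw [show List.map pvBword (w :: w' :: ws)
            = pvBword w :: pvBword w' :: List.map pvBword ws from rfl, PySem.Chars.join_cons_cons]
      have hb : pvAword n ((i + 1 : Nat) : Int) (PySem.Chars.lower w') ::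
            pvApplyIdx pvAword n (i + 1 + 1) (ws.map PySem.Chars.lower)
          = pvApplyIdx pvAword n (i + 1) ((w' :: ws).map PySem.Chars.lower) := by
        rw [show List.map PySem.Chars.lower (w' :: ws)
              = PySem.Chars.lower w' :: ws.map PySem.Chars.lower from rfl, pvApplyIdx_cons]
      rw [hb, ih w' (i + 1) n (by simp at hn ⊢; omega)
            (fun v hv => hne v (by simp at hv ⊢; tauto))]
      rw [show List.map pvBword (w' :: ws) = pvBword w' :: List.map pvBword ws from rfl]
      simp

-- A's first loop lowercases every word in place
lemma pvLoop1 (ws : List (List Char)) :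
    (PySem.List.pyRange 0 (ws.length : Int) 1).foldl
      (fun l i => PySem.List.pySetD l i (PySem.Chars.lower (PySem.List.pyGetD l i []))) ws
    = ws.map PySem.Chars.lower := by
  have h := pvSetLoop (fun _ _ a => PySem.Chars.lower a) ([] : List Char) ws []
  simpa [pvApplyIdx_const] using h

-- A's second loop copies the list of words
lemma pvLoop2 (ws : List (List Char)) :
    (PySem.List.pyRange 0 (ws.length : Int) 1).foldl
      (fun acc i => acc ++ [PySem.List.pyGetD ws i []]) []
    = ws := by
  have h := PySem.List.foldl_pyRange_zero_pyGetD' ws ([] : List Char)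
    (fun acc w => acc ++ [w]) []
  rw [PySem.List.foldl_append_singleton] at h
  simpa only [List.nil_append] using h

-- A's third loop, as pvApplyIdx
lemma pvLoop3 (l0 : List (List Char)) :
    (PySem.List.pyRange 0 (l0.length : Int) 1).foldl
      (fun l i => PySem.List.pySetD l i (pvAword l.length i (PySem.List.pyGetD l i []))) l0
    = pvApplyIdx pvAword l0.length 0 l0 := by
  have h := pvSetLoop pvAword ([] : List Char) l0 []
  simpa using h

-- ===== VERDICT (by name: the statement is the Claim_ definition above) =====
theorem titleize_spec : Claim_equal_titleize := by
  intro phrase _hdom hpre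
  unfold Pre_titleize at hpre
  show titleize phrase = titleize_alt phrase
  unfold titleize titleize_alt
  cases hws : PySem.Chars.splitOn phrase.toList [' '] with
  | nil => simp [PySem.Chars.join_nil]
  | cons w ws =>
      rw [hws] at hpre
      simp only [pvLoop1, pvLoop2, pvLoop3]
      rw [List.length_map]
      congr 1
      exact pvJoinLoop ws w 0 (w :: ws).length (by simp) hpre
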